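-- pv_equiv track=rewrite | github.com/ferruano99/DAA | DyV/ElemsRepetidos.py | dyv
-- ===== SOURCE A (Python) =====
-- def mirar_numeros(elem):
--     disponibles = [False] * 10
--     while elem > 0:
--         num = elem % 10
--         disponibles[num] = True
--         elem = elem // 10
--     return disponibles
--
-- def dyv(a,inicio,fin,disponibles):
--     if inicio == fin:
--         return mirar_numeros(a[inicio])
--
--     else:
--         mitad = (inicio + fin) // 2
--         d1 = dyv(a,inicio, mitad,disponibles)
--         d2 = dyv(a, mitad + 1, fin,disponibles)
--         disponibles2 = [False] * 10
--         for i in range(len(disponibles2)):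
--             if d1[i] and d2[i]:
--                 disponibles2[i] = True
--     return disponibles2
-- ===== SOURCE B (Python) =====
-- def mirar_numeros(elem):
--     disponibles = [False] * 10
--     while elem > 0:
--         num = elem % 10
--         disponibles[num] = True
--         elem = elem // 10
--     return disponibles
--
-- def dyv(a, inicio, fin, disponibles):
--     res = mirar_numeros(a[inicio])
--     for i in range(inicio + 1, fin + 1):
--         cur = mirar_numeros(a[i])
--         res = [x and y for x, y in zip(res, cur)]
--     return res
-- ===== Notes on version B (the rewrite author's own statement) =====
-- stated objective: simpler
-- what changed: The recursive divide-and-conquer over [inicio,fin] is replaced by a single left-to-right fold that intersects the digit masks with zip; the combine is associative so the tree order is irrelevant.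
import Mathlib
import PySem

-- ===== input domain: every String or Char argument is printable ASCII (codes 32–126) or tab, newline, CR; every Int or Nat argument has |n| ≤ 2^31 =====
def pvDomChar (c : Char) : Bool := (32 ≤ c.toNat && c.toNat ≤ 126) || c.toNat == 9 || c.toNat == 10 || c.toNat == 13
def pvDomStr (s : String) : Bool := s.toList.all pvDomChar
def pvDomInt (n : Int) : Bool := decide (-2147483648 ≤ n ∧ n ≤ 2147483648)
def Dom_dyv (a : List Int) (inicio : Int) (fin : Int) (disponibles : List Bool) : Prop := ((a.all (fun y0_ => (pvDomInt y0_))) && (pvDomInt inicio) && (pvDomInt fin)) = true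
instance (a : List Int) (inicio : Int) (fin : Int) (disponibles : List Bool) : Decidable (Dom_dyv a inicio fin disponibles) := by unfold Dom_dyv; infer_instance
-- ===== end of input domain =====

-- B replaces the recursive divide-and-conquer with a single left-to-right fold intersecting
-- digit masks (objective: simpler); equal on Pre_ (inicio ≤ fin, indices in range).

-- ===== PORT A =====
-- while elem > 0: num = elem % 10; disponibles[num] = True; elem //= 10
-- (num is always in 0..9 here, so the Python list assignment never raises; pySetD is exact)
def mnLoop (elem : Int) (disponibles : List Bool) : List Bool :=
  if elem > 0 then
    mnLoop (PySem.Int.floordiv elem 10)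
      (PySem.List.pySetD disponibles (PySem.Int.mod elem 10) true)
  else disponibles
termination_by elem.toNat
decreasing_by
  rw [PySem.Int.floordiv_eq_ediv_of_pos (by omega : (0:Int) < 10)]
  omega

def mirar_numeros (elem : Int) : List Bool := mnLoop elem (List.replicate 10 false)

-- the merge loop: disponibles2 = [False]*10; for i in range(10): if d1[i] and d2[i]: …
-- (d1, d2 always have length 10 in A's recursion, so d1[i]/d2[i] never raise; pyGetD is exact there)
def dyvCombine (d1 d2 : List Bool) : List Bool :=
  (PySem.List.pyRange 0 10 1).foldl
    (fun acc i =>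
      if PySem.List.pyGetD d1 i false && PySem.List.pyGetD d2 i false then
        PySem.List.pySetD acc i true
      else acc)
    (List.replicate 10 false)

-- A recurses forever when inicio > fin (Python: RecursionError); fuel (fin-inicio).toNat+1
-- suffices on every input Pre_ admits, the fuel-0 value is never reached there.
def dyvGo (fuel : Nat) (a : List Int) (inicio fin : Int) : List Bool :=
  match fuel with
  | 0 => List.replicate 10 false
  | fuel + 1 =>
    if inicio = fin then mirar_numeros (PySem.List.pyGetD a inicio 0)
    else
      let mitad := PySem.Int.floordiv (inicio + fin) 2
      dyvCombine (dyvGo fuel a inicio mitad) (dyvGo fuel a (mitad + 1) fin)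

def dyv (a : List Int) (inicio : Int) (fin : Int) (disponibles : List Bool) : List Bool :=
  dyvGo ((fin - inicio).toNat + 1) a inicio fin

-- ===== PORT B =====
-- res = mirar_numeros(a[inicio]); for i in range(inicio+1, fin+1): res = [x and y for x,y in zip(res, cur)]
def dyv_alt (a : List Int) (inicio : Int) (fin : Int) (disponibles : List Bool) : List Bool :=
  (PySem.List.pyRange (inicio + 1) (fin + 1) 1).foldl
    (fun res i => List.zipWith (fun x y => x && y) res (mirar_numeros (PySem.List.pyGetD a i 0)))
    (mirar_numeros (PySem.List.pyGetD a inicio 0))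

-- ===== PRECONDITION & SPEC =====
-- Exactly where A returns: inicio ≤ fin (otherwise infinite recursion → RecursionError) and
-- every accessed index inicio..fin is a valid Python index (otherwise IndexError).
def Pre_dyv (a : List Int) (inicio : Int) (fin : Int) (disponibles : List Bool) : Prop :=
  inicio ≤ fin ∧ -(a.length : Int) ≤ inicio ∧ fin < (a.length : Int)
instance (a : List Int) (inicio : Int) (fin : Int) (disponibles : List Bool) : Decidable (Pre_dyv a inicio fin disponibles) := by unfold Pre_dyv; infer_instance

def pvWitness_dyv : List Int × Int × Int × List Bool := ([12, 21, 102], 0, 2, [])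

def Spec_dyv (a : List Int) (inicio : Int) (fin : Int) (disponibles : List Bool) (out : List Bool) : Prop := out = dyv_alt a inicio fin disponibles
instance (a : List Int) (inicio : Int) (fin : Int) (disponibles : List Bool) (out : List Bool) : Decidable (Spec_dyv a inicio fin disponibles out) := by unfold Spec_dyv; infer_instance

-- ===== CLAIM (what is proved, stated in full; the proofs are below) =====
def Claim_equal_dyv : Prop := ∀ (a : List Int) (inicio : Int) (fin : Int) (disponibles : List Bool), Dom_dyv a inicio fin disponibles → Pre_dyv a inicio fin disponibles → Spec_dyv a inicio fin disponibles (dyv a inicio fin disponibles)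
-- ===== LEMMAS AND PROOFS =====

theorem mnLoop_length (elem : Int) (d : List Bool) : (mnLoop elem d).length = d.length := by
  fun_induction mnLoop elem d with
  | case1 e d hpos ih => rw [ih, PySem.List.length_pySetD]
  | case2 => rfl

theorem mirar_length (elem : Int) : (mirar_numeros elem).length = 10 := by
  simp [mirar_numeros, mnLoop_length]

theorem zipWith_and_assoc (x y z : List Bool) :
    List.zipWith (fun a b => a && b) x (List.zipWith (fun a b => a && b) y z) =
    List.zipWith (fun a b => a && b) (List.zipWith (fun a b => a && b) x y) z := by
  induction x generalizing y z with
  | nil => simp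
  | cons a x ih =>
    cases y with
    | nil => simp
    | cons b y =>
      cases z with
      | nil => simp
      | cons c z => simp [ih, Bool.and_assoc]

theorem combine_fold (d1 d2 : List Bool) (k : Nat) : ∀ (n : Nat), n + k = 10 →
    ∀ (acc : List Bool), acc.length = 10 →
    (PySem.List.pyRange (n : Int) 10 1).foldl
      (fun acc i =>
        if PySem.List.pyGetD d1 i false && PySem.List.pyGetD d2 i false then
          PySem.List.pySetD acc i true
        else acc) acc
    = (List.range 10).map (fun j =>
        if n ≤ j then acc.getD j false || (d1.getD j false && d2.getD j false)
        else acc.getD j false) := by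
  induction k with
  | zero =>
    intro n hn acc hlen
    have h10 : n = 10 := by omega
    subst h10
    rw [PySem.List.pyRange_one_eq_nil (by norm_num)]
    simp only [List.foldl_nil]
    refine List.ext_getElem (by simp [hlen]) ?_
    intro j hj1 hj2
    simp only [List.length_range] at hj2
    simp [List.getElem_map, List.getElem_range, List.getD_eq_getElem _ _ (by omega : j < acc.length),
      if_neg (by omega : ¬ 10 ≤ j), List.getElem?_eq_getElem hj1]
  | succ k ih =>
    intro n hn acc hlen
    have h10 : n < 10 := by omega
    rw [PySem.List.pyRange_one_cons (by exact_mod_cast h10)]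
    simp only [List.foldl_cons]
    rw [show (n : Int) + 1 = ((n + 1 : Nat) : Int) by push_cast; ring]
    have hlen' :
        (if PySem.List.pyGetD d1 (n:Int) false && PySem.List.pyGetD d2 (n:Int) false then
          PySem.List.pySetD acc (n:Int) true else acc).length = 10 := by
      split <;> simp [hlen]
    rw [ih (n + 1) (by omega) _ hlen']
    refine List.map_congr_left ?_
    intro j hj
    simp only [List.mem_range] at hj
    by_cases hjn : j = n
    · subst hjn
      rw [if_neg (by omega : ¬ j + 1 ≤ j), if_pos (le_refl j)]
      by_cases hc : (PySem.List.pyGetD d1 (j:Int) false && PySem.List.pyGetD d2 (j:Int) false) = true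
      · rw [if_pos hc]
        simp only [PySem.List.pySetD_natCast]
        rw [List.getD_eq_getElem _ _ (by simp [hlen]; omega),
          List.getElem_set_self (by simp [hlen]; omega)]
        simp only [PySem.List.pyGetD_natCast] at hc
        simp [List.getD, Bool.and_eq_true] at hc ⊢
        tauto
      · rw [if_neg hc]
        simp only [PySem.List.pyGetD_natCast] at hc
        simp [List.getD, Bool.and_eq_true] at hc ⊢
        intro h1 h2
        exact absurd (hc h1) (by simp [h2])
    · have hget :
          (if PySem.List.pyGetD d1 (n:Int) false && PySem.List.pyGetD d2 (n:Int) false then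
            PySem.List.pySetD acc (n:Int) true else acc).getD j false = acc.getD j false := by
        split
        · simp only [PySem.List.pySetD_natCast]
          rw [List.getD_eq_getElem _ _ (by simp [hlen]; omega),
            List.getD_eq_getElem _ _ (by omega : j < acc.length)]
          simp [List.getElem_set_ne (by omega : n ≠ j)]
        · rfl
      rw [hget]
      by_cases hle : n ≤ j
      · rw [if_pos (by omega : n + 1 ≤ j), if_pos hle]
      · rw [if_neg (by omega : ¬ n + 1 ≤ j), if_neg hle]

theorem combine_eq (d1 d2 : List Bool) (h1 : d1.length = 10) (h2 : d2.length = 10) :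
    dyvCombine d1 d2 = List.zipWith (fun x y => x && y) d1 d2 := by
  unfold dyvCombine
  have h := combine_fold d1 d2 10 0 rfl (List.replicate 10 false) (by simp)
  rw [Nat.cast_zero] at h
  rw [h]
  refine List.ext_getElem (by simp [h1, h2]) ?_
  intro j hj1 hj2
  simp only [List.length_map, List.length_range] at hj1
  rw [List.getElem_map, List.getElem_range, List.getElem_zipWith, if_pos (Nat.zero_le j),
    List.getD_eq_getElem _ _ (by omega : j < d1.length),
    List.getD_eq_getElem _ _ (by omega : j < d2.length),
    List.getD_eq_getElem _ _ (by simp; omega : j < (List.replicate 10 false).length),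
    List.getElem_replicate]
  simp

theorem fold_length (a : List Int) (l : List Int) (init : List Bool) (h : init.length = 10) :
    (l.foldl (fun res i => List.zipWith (fun x y => x && y) res
        (mirar_numeros (PySem.List.pyGetD a i 0))) init).length = 10 := by
  induction l generalizing init with
  | nil => exact h
  | cons i l ih =>
    exact ih _ (by simp [h, mirar_length])

theorem fold_pull (a : List Int) (l : List Int) (x y : List Bool) :
    List.zipWith (fun p q => p && q) x (l.foldl (fun res i => List.zipWith (fun p q => p && q) res
        (mirar_numeros (PySem.List.pyGetD a i 0))) y) =
    l.foldl (fun res i => List.zipWith (fun p q => p && q) res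
        (mirar_numeros (PySem.List.pyGetD a i 0))) (List.zipWith (fun p q => p && q) x y) := by
  induction l generalizing y with
  | nil => rfl
  | cons i l ih => simp only [List.foldl_cons, ih, zipWith_and_assoc]

theorem dyvGo_eq (a : List Int) (fuel : Nat) (lo hi : Int) (h : lo ≤ hi)
    (hf : (hi - lo).toNat < fuel) :
    dyvGo fuel a lo hi = dyv_alt a lo hi [] := by
  induction fuel generalizing lo hi with
  | zero => omega
  | succ fuel ih =>
    by_cases heq : lo = hi
    · subst heq
      simp [dyvGo, dyv_alt, PySem.List.pyRange_one_eq_nil (le_refl (lo + 1))]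
    · have hlt : lo < hi := lt_of_le_of_ne h heq
      have hmid := PySem.Int.floordiv_two_mid_bounds h
      set m := PySem.Int.floordiv (lo + hi) 2 with hm
      have hmlt : m < hi := by
        rw [hm, PySem.Int.floordiv_lt_iff_lt_mul (by omega : (0:Int) < 2)]
        omega
      have h1 : dyvGo fuel a lo m = dyv_alt a lo m [] := ih lo m hmid.1 (by omega)
      have h2 : dyvGo fuel a (m + 1) hi = dyv_alt a (m + 1) hi [] := ih (m + 1) hi (by omega) (by omega)
      have hL : (dyv_alt a lo m []).length = 10 := fold_length a _ _ (mirar_length _)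
      have hR : (dyv_alt a (m + 1) hi []).length = 10 := fold_length a _ _ (mirar_length _)
      simp only [dyvGo, if_neg heq, ← hm, h1, h2, combine_eq _ _ hL hR]
      -- unfold the B-side fold and split its range at m+1
      simp only [dyv_alt]
      rw [fold_pull]
      rw [PySem.List.pyRange_one_append (lo + 1) (m + 1) (hi + 1) (by omega) (by omega),
        List.foldl_append,
        PySem.List.pyRange_one_cons (by omega : m + 1 < hi + 1)]
      simp only [List.foldl_cons]

-- ===== VERDICT (by name: the statement is the Claim_ definition above) =====
theorem dyv_spec : Claim_equal_dyv := by
  intro a inicio fin disponibles _ hpre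
  have h := dyvGo_eq a ((fin - inicio).toNat + 1) inicio fin hpre.1 (by omega)
  simpa [Spec_dyv, dyv, dyv_alt] using h
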